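-- pv_equiv track=rewrite | github.com/KhanTooba/substitutionCipher | cryptanalysis.py | firstTimeDecipher
-- ===== SOURCE A (Python) =====
-- def firstTimeDecipher(text, freq, substitue):
--     count = 0
--     while(freq.items()):
--         maxVal = -1
--         maxKey = ""
--         for key,value in freq.items():
--             if maxVal < value:
--                 maxVal = value
--                 maxKey = key
--         text=text.replace(chr(maxKey),substitue[count])
--         count = count + 1
--         freq.pop(maxKey)
--     return text
-- ===== SOURCE B (Python) =====
-- def firstTimeDecipher(text, freq, substitue):
--     # Stable descending sort replaces A's repeated max-scan; freq is cleared
--     # to replicate A's in-place emptying of the dict.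
--     order = sorted(freq.items(), key=lambda kv: kv[1], reverse=True)
--     freq.clear()
--     for i, (key, _) in enumerate(order):
--         text = text.replace(chr(key), substitue[i])
--     return text
-- ===== Notes on version B (the rewrite author's own statement) =====
-- stated objective: faster
-- what changed: A's quadratic loop that rescans the whole dict for the max on every round is replaced by one stable descending sort of the items followed by a single indexed replace loop (freq is cleared to keep A's in-place emptying).
import Mathlib
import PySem

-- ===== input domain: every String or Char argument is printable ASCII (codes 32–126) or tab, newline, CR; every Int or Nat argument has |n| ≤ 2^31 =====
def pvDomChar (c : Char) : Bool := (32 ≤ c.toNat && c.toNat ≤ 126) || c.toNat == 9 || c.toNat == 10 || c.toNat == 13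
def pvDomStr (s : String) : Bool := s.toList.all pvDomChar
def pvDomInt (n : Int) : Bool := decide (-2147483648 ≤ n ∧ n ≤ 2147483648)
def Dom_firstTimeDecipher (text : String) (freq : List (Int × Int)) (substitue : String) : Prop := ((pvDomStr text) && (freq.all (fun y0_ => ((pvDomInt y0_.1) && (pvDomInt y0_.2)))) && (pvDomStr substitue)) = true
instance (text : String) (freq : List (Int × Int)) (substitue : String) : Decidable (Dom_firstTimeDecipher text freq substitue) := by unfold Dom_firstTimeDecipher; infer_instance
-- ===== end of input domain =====

-- B replaces A's quadratic repeated max-scan by one stable descending sort followed by a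
-- single replace loop; both A and B empty the freq dict in place (return values are what
-- is proved equal here).

-- chr(k): exact for valid non-surrogate codepoints; for surrogates (where Python's chr
-- returns a char that cannot occur in a Dom text, so the replace is a no-op) this gives
-- '\x00', also absent from Dom text; invalid codepoints (Python chr raises) are outside Pre_.
def pyChr (k : Int) : Char := Char.ofNat k.toNat

-- ===== PORT A =====
-- state (maxVal, maxKey); maxKey = none is Python's "" sentinel (chr("") raises there)
def fmStep (st : Int × Option Int) (p : Int × Int) : Int × Option Int :=
  if st.1 < p.2 then (p.2, some p.1) else st

-- the inner 'for key,value in freq.items()' loop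
def findMax (items : List (Int × Int)) : Int × Option Int :=
  items.foldl fmStep (-1, none)

-- the 'while freq.items()' loop; fuel = initial dict size (each iteration pops one key);
-- the '| _, _' arm is where Python raises (chr("") TypeError / IndexError), outside Pre_
def loopA (substitue : String) : Nat → String → List (Int × Int) → Int → String
  | 0, text, _, _ => text
  | fuel + 1, text, items, count =>
    if items = [] then text
    else
      match (findMax items).2, PySem.Str.pyGet? substitue count with
      | some maxKey, some c =>
          loopA substitue fuel
            (PySem.Str.replace text (String.singleton (pyChr maxKey)) (String.singleton c))
            (items.eraseP (fun q => q.1 == maxKey)) (count + 1)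
      | _, _ => text

def firstTimeDecipher (text : String) (freq : List (Int × Int)) (substitue : String) : String :=
  loopA substitue freq.length text freq 0

-- ===== PORT B =====
-- one body of B's for loop; the 'none' arm is Python's IndexError, outside Pre_
def replStep (substitue : String) (t : String) (q : Int × (Int × Int)) : String :=
  match PySem.Str.pyGet? substitue q.1 with
  | some c => PySem.Str.replace t (String.singleton (pyChr q.2.1)) (String.singleton c)
  | none => t

def firstTimeDecipher_alt (text : String) (freq : List (Int × Int)) (substitue : String) : String :=
  (PySem.List.enumerate (PySem.List.sorted freq (fun kv => kv.2) true) 0).foldl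
    (replStep substitue) text

-- ===== PRECONDITION & SPEC =====
-- freq is a Python dict, so its keys are unique (representation invariant); A returns a value
-- exactly when every value is ≥ 0 (else chr("") TypeError), every key is a valid codepoint
-- (else chr ValueError) and the dict is no longer than substitue (else IndexError).
def Pre_firstTimeDecipher (text : String) (freq : List (Int × Int)) (substitue : String) : Prop :=
  (freq.map Prod.fst).Nodup ∧ (∀ p ∈ freq, 0 ≤ p.2 ∧ 0 ≤ p.1 ∧ p.1 ≤ 1114111) ∧
    (freq.length : Int) ≤ PySem.Str.len substitue
instance (text : String) (freq : List (Int × Int)) (substitue : String) : Decidable (Pre_firstTimeDecipher text freq substitue) := by unfold Pre_firstTimeDecipher; infer_instance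

def pvWitness_firstTimeDecipher : String × (List (Int × Int)) × String :=
  ("abba", [(97, 2), (98, 1)], "xy")

def Spec_firstTimeDecipher (text : String) (freq : List (Int × Int)) (substitue : String) (out : String) : Prop := out = firstTimeDecipher_alt text freq substitue
instance (text : String) (freq : List (Int × Int)) (substitue : String) (out : String) : Decidable (Spec_firstTimeDecipher text freq substitue out) := by unfold Spec_firstTimeDecipher; infer_instance

-- ===== CLAIM (what is proved, stated in full; the proofs are below) =====
def Claim_equal_firstTimeDecipher : Prop := ∀ (text : String) (freq : List (Int × Int)) (substitue : String), Dom_firstTimeDecipher text freq substitue → Pre_firstTimeDecipher text freq substitue → Spec_firstTimeDecipher text freq substitue (firstTimeDecipher text freq substitue)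


-- ===== LEMMAS AND PROOFS =====

-- once an index is past the end of substitue, so is every later one
lemma strGetNone_succ (s : String) (i : Int) (h0 : 0 ≤ i)
    (h : PySem.Str.pyGet? s i = none) : PySem.Str.pyGet? s (i + 1) = none := by
  simp [PySem.Str.pyGet?, PySem.List.pyGet?_eq_none_iff, PySem.Raise.InRange] at h ⊢
  omega

-- a fold whose every index misses substitue leaves the text unchanged
lemma foldNone (s : String) (l : List (Int × Int)) (t : String) (i : Int)
    (h0 : 0 ≤ i) (h : PySem.Str.pyGet? s i = none) :
    (PySem.List.enumerate l i).foldl (replStep s) t = t := by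
  induction l generalizing i t with
  | nil => simp [PySem.List.enumerate_nil]
  | cons x xs ih =>
    rw [PySem.List.enumerate_cons]
    simp only [List.foldl_cons]
    rw [show replStep s t (i, x) = t from by simp only [replStep, h]]
    exact ih t (i + 1) (by omega) (strGetNone_succ s i h0 h)

lemma sortedRev_snoc (l : List (Int × Int)) (x : Int × Int) :
    PySem.List.sorted (l ++ [x]) (fun kv => kv.2) true
      = PySem.List.insertBy (fun a b => decide (b.2 < a.2)) x
          (PySem.List.sorted l (fun kv => kv.2) true) := by
  rw [PySem.List.sorted_rev_eq_foldl_insertBy, PySem.List.sorted_rev_eq_foldl_insertBy,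
    List.foldl_append]
  simp

-- the head of Python's stable descending sort is exactly the element A's max-scan picks,
-- and popping its key from the list leaves exactly the sorted tail's elements
lemma headSel : ∀ (xs : List (Int × Int)), xs ≠ [] →
    (∀ p ∈ xs, 0 ≤ p.2) → ((xs.map Prod.fst).Nodup) →
    ∃ m, m ∈ xs ∧ findMax xs = (m.2, some m.1) ∧ (∀ p ∈ xs, p.2 ≤ m.2) ∧
      PySem.List.sorted xs (fun kv => kv.2) true
        = m :: PySem.List.sorted (xs.eraseP (fun q => q.1 == m.1)) (fun kv => kv.2) true := by
  intro xs
  induction xs using List.reverseRecOn with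
  | nil => intro h; exact absurd rfl h
  | append_singleton ys x ih =>
    intro _ hv hk
    have hk' : (ys.map Prod.fst).Nodup ∧ x.1 ∉ ys.map Prod.fst := by
      rw [List.map_append] at hk
      simp only [List.map_cons, List.map_nil] at hk
      rcases List.nodup_append.mp hk with ⟨h1, _, h3⟩
      exact ⟨h1, fun hmem => by simpa using h3 x.1 hmem⟩
    by_cases hys : ys = []
    · subst hys
      refine ⟨x, by simp, ?_, by simp, ?_⟩
      · simp only [findMax, List.nil_append, List.foldl_cons, List.foldl_nil, fmStep]
        rw [if_pos (by have := hv x (by simp); omega)]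
      · have h1 : PySem.List.sorted ([] ++ [x]) (fun kv => kv.2) true = [x] := by
          rw [sortedRev_snoc]; rfl
        rw [h1]
        simp [PySem.List.sorted]
    · obtain ⟨m, hmem, hfm, hmax, hsort⟩ := ih hys
        (fun p hp => hv p (List.mem_append_left _ hp)) hk'.1
      have hfm' : findMax (ys ++ [x]) = fmStep (m.2, some m.1) x := by
        unfold findMax at hfm ⊢
        rw [List.foldl_append, hfm]; rfl
      by_cases hlt : m.2 < x.2
      · refine ⟨x, by simp, ?_, ?_, ?_⟩
        · rw [hfm']; simp [fmStep, hlt]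
        · intro p hp
          rcases List.mem_append.mp hp with hp' | hp'
          · exact le_of_lt (lt_of_le_of_lt (hmax p hp') hlt)
          · simp at hp'; subst hp'; exact le_rfl
        · have herase : (ys ++ [x]).eraseP (fun q => q.1 == x.1) = ys := by
            rw [List.eraseP_append_right _ (fun b hb hpb => hk'.2 (by
              simp only [beq_iff_eq] at hpb
              exact hpb ▸ List.mem_map_of_mem hb))]
            simp
          rw [herase, sortedRev_snoc, hsort]
          simp only [PySem.List.insertBy]
          rw [if_pos (by simpa using hlt), ← hsort]
      · refine ⟨m, List.mem_append_left _ hmem, ?_, ?_, ?_⟩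
        · rw [hfm']; simp [fmStep, hlt]
        · intro p hp
          rcases List.mem_append.mp hp with hp' | hp'
          · exact hmax p hp'
          · simp at hp'; subst hp'; omega
        · have herase : (ys ++ [x]).eraseP (fun q => q.1 == m.1)
              = ys.eraseP (fun q => q.1 == m.1) ++ [x] := by
            exact List.eraseP_append_left (p := fun q : Int × Int => q.1 == m.1) (a := m)
              (beq_self_eq_true m.1) [x] hmem
          rw [herase, sortedRev_snoc, sortedRev_snoc, hsort]
          simp only [PySem.List.insertBy]
          rw [if_neg (by simpa using hlt)]

lemma mainE (substitue : String) :
    ∀ (fuel : Nat) (xs : List (Int × Int)) (text : String) (count : Int),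
      xs.length ≤ fuel → 0 ≤ count → (∀ p ∈ xs, 0 ≤ p.2) → (xs.map Prod.fst).Nodup →
      loopA substitue fuel text xs count
        = (PySem.List.enumerate (PySem.List.sorted xs (fun kv => kv.2) true) count).foldl
            (replStep substitue) text := by
  intro fuel
  induction fuel with
  | zero =>
    intro xs text count hlen _ _ _
    rw [List.length_eq_zero_iff.mp (Nat.le_zero.mp hlen)]
    rfl
  | succ fuel ih =>
    intro xs text count hlen h0 hv hk
    by_cases hxs : xs = []
    · subst hxs; rfl
    · obtain ⟨m, hmem, hfm, _, hsort⟩ := headSel xs hxs hv hk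
      have hsub : List.Sublist (xs.eraseP (fun q => q.1 == m.1)) xs := List.eraseP_sublist
      have hlen' : (xs.eraseP (fun q => q.1 == m.1)).length ≤ fuel := by
        have := List.length_eraseP_of_mem (p := fun q : Int × Int => q.1 == m.1) hmem (beq_self_eq_true m.1)
        omega
      have hv' : ∀ p ∈ xs.eraseP (fun q => q.1 == m.1), 0 ≤ p.2 :=
        fun p hp => hv p (hsub.subset hp)
      have hk' : ((xs.eraseP (fun q => q.1 == m.1)).map Prod.fst).Nodup :=
        List.Nodup.sublist (hsub.map Prod.fst) hk
      rw [hsort, PySem.List.enumerate_cons, List.foldl_cons]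
      simp only [loopA, if_neg hxs, hfm]
      cases hget : PySem.Str.pyGet? substitue count with
      | none =>
        rw [show replStep substitue text (count, m) = text from by simp only [replStep, hget]]
        exact (foldNone substitue _ text (count + 1) (by omega)
          (strGetNone_succ substitue count h0 hget)).symm
      | some c =>
        rw [show replStep substitue text (count, m)
            = PySem.Str.replace text (String.singleton (pyChr m.1)) (String.singleton c) from by
          simp only [replStep, hget]]
        exact ih _ _ _ hlen' (by omega) hv' hk'

-- ===== VERDICT (by name: the statement is the Claim_ definition above) =====
theorem firstTimeDecipher_spec : Claim_equal_firstTimeDecipher := by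
  intro text freq substitue _hD hP
  obtain ⟨hk, hv, _⟩ := hP
  unfold Spec_firstTimeDecipher firstTimeDecipher firstTimeDecipher_alt
  exact mainE substitue freq.length freq text 0 le_rfl le_rfl (fun p hp => (hv p hp).1) hk
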